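-- pv_equiv track=rewrite | github.com/swiftpostlab/python-uv-template | scripts/transition_to_uv.py | remove_script_key
-- ===== SOURCE A (Python) =====
-- def remove_script_key(content: str, key: str) -> str:
--     """Remove a single key-value line from [project.scripts]."""
--     lines = content.splitlines(keepends=True)
--     result: list[str] = []
--     in_scripts = False
--     for line in lines:
--         if line.strip() == "[project.scripts]":
--             in_scripts = True
--         elif in_scripts and line.strip().startswith("["):
--             in_scripts = False
--         if in_scripts and line.strip().startswith(f"{key}"):
--             continue
--         result.append(line)
--     return "".join(result)
-- ===== SOURCE B (Python) =====
-- def remove_script_key(content: str, key: str) -> str: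
--     """Remove a single key-value line from [project.scripts] (block-based)."""
--     lines = content.splitlines(keepends=True)
--     # group lines into blocks; a line whose stripped form starts with "[" opens a new block
--     blocks: list[list[str]] = []
--     cur: list[str] = []
--     for line in lines:
--         if line.strip().startswith("["):
--             blocks.append(cur)
--             cur = [line]
--         else:
--             cur.append(line)
--     blocks.append(cur)
--     out: list[str] = []
--     for block in blocks:
--         if block and block[0].strip() == "[project.scripts]":
--             out.extend(l for l in block if not l.strip().startswith(key))
--         else:
--             out.extend(block)
--     return "".join(out)
-- ===== Notes on version B (the rewrite author's own statement) =====
-- stated objective: alternative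
-- what changed: B splits the content into section blocks (a new block at every line whose stripped form starts with '[') and filters only the block headed exactly by '[project.scripts]', instead of A's single pass with a running in_scripts boolean flag.
import Mathlib
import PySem

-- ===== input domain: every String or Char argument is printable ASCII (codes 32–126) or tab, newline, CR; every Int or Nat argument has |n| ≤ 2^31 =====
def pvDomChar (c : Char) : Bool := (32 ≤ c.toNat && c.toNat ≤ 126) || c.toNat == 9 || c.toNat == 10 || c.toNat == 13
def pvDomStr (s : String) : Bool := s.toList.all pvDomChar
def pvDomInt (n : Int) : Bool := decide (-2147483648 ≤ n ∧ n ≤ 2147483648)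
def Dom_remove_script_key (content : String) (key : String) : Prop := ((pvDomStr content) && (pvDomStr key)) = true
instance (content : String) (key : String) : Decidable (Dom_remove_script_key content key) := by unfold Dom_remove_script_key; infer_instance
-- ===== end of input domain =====

-- B re-decomposes A's flag-driven single pass into section blocks filtered per block; equivalent, no speed claim.

-- Shared primitive: content.splitlines(keepends=True), exact on the domain's line breaks '\n', '\r', '\r\n'
-- (Dom admits no '\v'/'\f'/Unicode breaks, so this hand port is exact there).
def pvSplitKeep (cur : List Char) : List Char → List (List Char)
  | [] => if cur = [] then [] else [cur.reverse]
  | '\r' :: '\n' :: rest => (cur.reverse ++ ['\r', '\n']) :: pvSplitKeep [] rest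
  | '\n' :: rest => (cur.reverse ++ ['\n']) :: pvSplitKeep [] rest
  | '\r' :: rest => (cur.reverse ++ ['\r']) :: pvSplitKeep [] rest
  | c :: rest => pvSplitKeep (c :: cur) rest

-- line.strip().startswith("[")  /  line.strip() == "[project.scripts]"  /  line.strip().startswith(key)
def pvIsHdr (l : List Char) : Bool := PySem.Chars.startswith (PySem.Chars.strip l) ['[']
def pvIsScr (l : List Char) : Bool := PySem.Chars.strip l == "[project.scripts]".toList
def pvDrop (k l : List Char) : Bool := PySem.Chars.startswith (PySem.Chars.strip l) k

-- ===== PORT A =====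
-- one loop body of A: state = (result, in_scripts)
def pvStepA (k : List Char) (st : List (List Char) × Bool) (l : List Char) : List (List Char) × Bool :=
  let ins := if pvIsScr l then true else if st.2 && pvIsHdr l then false else st.2
  if ins && pvDrop k l then (st.1, ins) else (st.1 ++ [l], ins)

def remove_script_key (content : String) (key : String) : String :=
  let lines := pvSplitKeep [] content.toList
  let st := lines.foldl (pvStepA key.toList) ([], false)
  String.ofList (PySem.Chars.join [] st.1)

-- ===== PORT B =====
-- first loop of B: split into blocks, state = (blocks, cur)
def pvStepB (st : List (List (List Char)) × List (List Char)) (l : List Char) :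
    List (List (List Char)) × List (List Char) :=
  if pvIsHdr l then (st.1 ++ [st.2], [l]) else (st.1, st.2 ++ [l])

-- second loop of B: emit each block, filtering the [project.scripts] block
def pvExtB (k : List Char) (out : List (List Char)) (blk : List (List Char)) : List (List Char) :=
  match blk with
  | [] => out
  | h :: _ => if pvIsScr h then out ++ blk.filter (fun l => !pvDrop k l) else out ++ blk

def remove_script_key_alt (content : String) (key : String) : String :=
  let lines := pvSplitKeep [] content.toList
  let st := lines.foldl pvStepB ([], [])
  let blocks := st.1 ++ [st.2]
  let out := blocks.foldl (pvExtB key.toList) []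
  String.ofList (PySem.Chars.join [] out)

-- ===== PRECONDITION & SPEC =====
def Spec_remove_script_key (content : String) (key : String) (out : String) : Prop := out = remove_script_key_alt content key
instance (content : String) (key : String) (out : String) : Decidable (Spec_remove_script_key content key out) := by unfold Spec_remove_script_key; infer_instance

-- ===== CLAIM (what is proved, stated in full; the proofs are below) =====
def Claim_equal_remove_script_key : Prop := ∀ (content : String) (key : String), Dom_remove_script_key content key → Spec_remove_script_key content key (remove_script_key content key)

-- ===== LEMMAS AND PROOFS =====

-- the list of lines A keeps, written as a recursion over the lines
def pvAkept (k : List Char) (b : Bool) : List (List Char) → List (List Char)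
  | [] => []
  | l :: ls =>
    let b' := if pvIsScr l then true else if b && pvIsHdr l then false else b
    (if b' && pvDrop k l then [] else [l]) ++ pvAkept k b' ls

-- whether a block is the [project.scripts] block, and what B emits for it
def pvScrB (blk : List (List Char)) : Bool := match blk with | [] => false | h :: _ => pvIsScr h
def pvFB (k : List Char) (blk : List (List Char)) : List (List Char) :=
  if pvScrB blk then blk.filter (fun l => !pvDrop k l) else blk

lemma pvExtB_eq (k : List Char) (out blk : List (List Char)) : pvExtB k out blk = out ++ pvFB k blk := by
  cases blk with
  | nil => simp [pvExtB, pvFB, pvScrB]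
  | cons h t => simp only [pvExtB, pvFB, pvScrB]; split_ifs <;> rfl

lemma pvFoldExt (k : List Char) (blocks : List (List (List Char))) (out : List (List Char)) :
    blocks.foldl (pvExtB k) out = out ++ blocks.flatMap (pvFB k) := by
  induction blocks generalizing out with
  | nil => simp
  | cons b bs ih => simp [List.foldl_cons, pvExtB_eq, ih, List.flatMap_cons, List.append_assoc]

lemma pvIsScr_isHdr {l : List Char} (h : pvIsScr l = true) : pvIsHdr l = true := by
  unfold pvIsScr at h
  unfold pvIsHdr
  rw [beq_iff_eq] at h
  rw [h]
  decide

lemma pvFoldA (k : List Char) (ls : List (List Char)) :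
    ∀ (res : List (List Char)) (b : Bool),
    (ls.foldl (pvStepA k) (res, b)).1 = res ++ pvAkept k b ls := by
  induction ls with
  | nil => intro res b; simp [pvAkept]
  | cons l ls ih =>
    intro res b
    simp only [List.foldl_cons, pvStepA, pvAkept]
    split_ifs with h <;> simp [ih, List.append_assoc]

lemma pvMain (k : List Char) (ls : List (List Char)) :
    ∀ (blocks : List (List (List Char))) (cur : List (List Char)) (b : Bool),
    b = pvScrB cur →
    ((ls.foldl pvStepB (blocks, cur)).1 ++ [(ls.foldl pvStepB (blocks, cur)).2]).flatMap (pvFB k)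
      = blocks.flatMap (pvFB k) ++ pvFB k cur ++ pvAkept k b ls := by
  induction ls with
  | nil =>
    intro blocks cur b _
    simp [pvAkept, List.flatMap_append]
  | cons l ls ih =>
    intro blocks cur b hb
    simp only [List.foldl_cons, pvStepB]
    by_cases hh : pvIsHdr l = true
    · -- l opens a new block
      simp only [hh, if_pos]
      have hb' : (if pvIsScr l then true else if b && pvIsHdr l then false else b) = pvScrB [l] := by
        by_cases hs : pvIsScr l = true <;> simp [pvScrB, hs, hh]
      rw [ih (blocks ++ [cur]) [l] _ hb']
      simp only [pvAkept, List.flatMap_append, List.flatMap_cons, List.flatMap_nil,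
        List.append_nil, List.append_assoc]
      congr 2
      congr 1
      simp only [pvScrB] at hb'
      rw [hb']
      by_cases hs : pvIsScr l = true
      · simp only [pvFB, pvScrB, hs, if_pos, Bool.true_and, List.filter]
        by_cases hd : pvDrop k l = true <;> simp [hd]
      · simp [pvFB, pvScrB, hs]
    · -- l joins the current block
      rw [Bool.not_eq_true] at hh
      rw [if_neg (by simp [hh])]
      have hs : pvIsScr l = false := by
        by_contra hc
        simp only [Bool.not_eq_false] at hc
        exact absurd (pvIsScr_isHdr hc) (by simp [hh])
      have hb' : b = pvScrB (cur ++ [l]) := by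
        cases cur with
        | nil =>
          simp only [pvScrB] at hb
          simp [pvScrB, hb, hs]
        | cons h t => simpa [pvScrB] using hb
      rw [ih blocks (cur ++ [l]) b hb']
      have hfb : pvFB k (cur ++ [l])
          = pvFB k cur ++ (if (b && pvDrop k l) = true then [] else [l]) := by
        cases cur with
        | nil =>
          simp only [pvScrB] at hb
          simp [pvFB, pvScrB, hs, hb]
        | cons h t =>
          simp only [pvScrB] at hb
          by_cases hsh : pvIsScr h = true
          · rw [hb, hsh]
            simp only [pvFB, pvScrB, hsh, if_pos, Bool.true_and, List.filter_append]
            by_cases hd : pvDrop k l = true <;> simp [hd, hsh, List.filter]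
          · simp only [Bool.not_eq_true] at hsh
            rw [hb, hsh]
            simp [pvFB, pvScrB, hsh]
      rw [hfb]
      simp only [pvAkept, hs, hh, Bool.false_eq_true, if_false, Bool.and_false,
        List.append_assoc]

-- ===== VERDICT (by name: the statement is the Claim_ definition above) =====
theorem remove_script_key_spec : Claim_equal_remove_script_key := by
  intro content key _
  unfold Spec_remove_script_key remove_script_key remove_script_key_alt
  simp only
  rw [pvFoldExt, pvFoldA]
  rw [pvMain key.toList (pvSplitKeep [] content.toList) [] [] false (by simp [pvScrB])]
  simp [pvFB, pvScrB]
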